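-- pv_equiv track=rewrite | github.com/aaronlael/AoC-2021 | AoC_2021_D1P12P2.py | branchvalid
-- ===== SOURCE A (Python) =====
-- def branchvalid(b):
--     sb = set(b)
--     morethanone = 0
--     for s in sb:
--         if s.lower() == s:
--             if b.count(s) > 2:
--                 return False
--             if b.count(s) == 2:
--                 morethanone += 1
--     if morethanone > 1:
--         return False
--     return True
-- ===== SOURCE B (Python) =====
-- def branchvalid(b):
--     counts = {}
--     for s in b:
--         if s.lower() == s:
--             counts[s] = counts.get(s, 0) + 1
--     return sum(c - 1 for c in counts.values()) <= 1
-- ===== Notes on version B (the rewrite author's own statement) =====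
-- stated objective: simpler
-- what changed: Replaces the iterate-over-set loop with repeated b.count() calls and two threshold branches (early False on count>2, tally of count==2, final tally>1 test) by a single pass building a frequency dict of lowercase nodes and one aggregate inequality: sum of (count-1) over lowercase nodes <= 1.
import Mathlib
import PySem

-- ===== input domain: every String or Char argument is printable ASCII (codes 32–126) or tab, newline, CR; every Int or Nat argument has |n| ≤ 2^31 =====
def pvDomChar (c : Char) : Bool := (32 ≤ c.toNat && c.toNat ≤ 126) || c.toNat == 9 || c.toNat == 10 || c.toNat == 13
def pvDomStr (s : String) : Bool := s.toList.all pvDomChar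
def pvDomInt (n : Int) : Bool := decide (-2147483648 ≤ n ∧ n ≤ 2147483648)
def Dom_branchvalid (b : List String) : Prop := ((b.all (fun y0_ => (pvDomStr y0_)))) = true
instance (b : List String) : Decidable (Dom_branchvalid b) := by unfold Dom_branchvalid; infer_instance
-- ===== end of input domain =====

-- B replaces A's set-loop with repeated b.count() and two threshold branches by one
-- frequency-dict pass plus a single aggregate inequality (objective: simpler).

-- ===== PORT A =====
-- 'for s in sb: …' with early 'return False' as structural recursion over the set's list
def branchvalidLoop (b : List String) : List String → Int → Bool
  | [], morethanone => if morethanone > 1 then false else true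
  | s :: rest, morethanone =>
    if PySem.Str.lower s == s then
      if PySem.List.count b s > 2 then false
      else if PySem.List.count b s == 2 then branchvalidLoop b rest (morethanone + 1)
      else branchvalidLoop b rest morethanone
    else branchvalidLoop b rest morethanone

def branchvalid (b : List String) : Bool :=
  branchvalidLoop b (PySem.Set.ofList b) 0

-- ===== PORT B =====
def branchvalid_alt (b : List String) : Bool :=
  let counts := b.foldl
    (fun d s => if PySem.Str.lower s == s then d.insert s (d.getD s 0 + 1) else d)
    PySem.Dict.empty
  decide (((counts.values).map (fun c => c - 1)).sum ≤ (1 : Int))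

-- ===== PRECONDITION & SPEC =====
def Spec_branchvalid (b : List String) (out : Bool) : Prop := out = branchvalid_alt b
instance (b : List String) (out : Bool) : Decidable (Spec_branchvalid b out) := by unfold Spec_branchvalid; infer_instance

-- ===== CLAIM (what is proved, stated in full; the proofs are below) =====
def Claim_equal_branchvalid : Prop := ∀ (b : List String), Dom_branchvalid b → Spec_branchvalid b (branchvalid b)

-- ===== LEMMAS AND PROOFS =====

-- fold with an 'if' guard = fold over the filtered list
theorem pv_foldl_filter_if {α β : Type} (p : α → Bool) (f : β → α → β) :
    ∀ (xs : List α) (init : β),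
      xs.foldl (fun acc x => if p x then f acc x else acc) init
        = (xs.filter p).foldl f init := by
  intro xs
  induction xs with
  | nil => intro init; rfl
  | cons x xs ih =>
      intro init
      by_cases hp : p x = true
      · simp [hp, ih]
      · simp [hp, ih]

-- Set.add commutes with filter (element kept)
theorem pv_add_filter_pos (p : String → Bool) (acc : List String) (x : String)
    (hp : p x = true) :
    (PySem.Set.add acc x).filter p = PySem.Set.add (acc.filter p) x := by
  simp only [PySem.Set.add]
  by_cases hx : x ∈ acc
  · simp [hx, List.mem_filter, hp]
  · simp [hx, List.mem_filter, hp, List.filter_append]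

-- Set.add commutes with filter (element dropped)
theorem pv_add_filter_neg (p : String → Bool) (acc : List String) (x : String)
    (hp : ¬ p x = true) :
    (PySem.Set.add acc x).filter p = acc.filter p := by
  simp only [PySem.Set.add]
  by_cases hx : x ∈ acc
  · simp [hx]
  · simp [hx, List.filter_append, hp]

theorem pv_ofList_foldl_filter (p : String → Bool) :
    ∀ (xs : List String) (acc : List String),
      (xs.foldl PySem.Set.add acc).filter p
        = (xs.filter p).foldl PySem.Set.add (acc.filter p) := by
  intro xs
  induction xs with
  | nil => intro acc; rfl
  | cons x xs ih =>
      intro acc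
      by_cases hp : p x = true
      · simp only [List.foldl_cons, List.filter_cons, hp, if_pos]
        rw [ih, pv_add_filter_pos p acc x hp]
      · simp only [List.foldl_cons, List.filter_cons, hp, Bool.false_eq_true, if_false]
        rw [ih, pv_add_filter_neg p acc x hp]

-- first-occurrence dedup commutes with filter
theorem pv_ofList_filter (p : String → Bool) (xs : List String) :
    PySem.Set.ofList (xs.filter p) = (PySem.Set.ofList xs).filter p := by
  unfold PySem.Set.ofList
  rw [pv_ofList_foldl_filter p xs PySem.Set.empty]
  rfl

-- A's loop computes the aggregate inequality, given every visited lowercase node occurs in b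
theorem pv_loop_eq (b : List String) :
    ∀ (l : List String) (m : Int), 0 ≤ m →
      (∀ s ∈ l, (PySem.Str.lower s == s) = true → 1 ≤ List.count s b) →
      branchvalidLoop b l m
        = decide (m + ((l.filter (fun s => PySem.Str.lower s == s)).map
            (fun s => (List.count s b : Int) - 1)).sum ≤ 1) := by
  intro l
  induction l with
  | nil =>
      intro m _ _
      simp only [branchvalidLoop, List.filter_nil, List.map_nil, List.sum_nil, add_zero]
      split_ifs with h
      · simp; omega
      · simp; omega
  | cons s rest ih =>
      intro m hm hcount
      have hrest : ∀ t ∈ rest, (PySem.Str.lower t == t) = true → 1 ≤ List.count t b := by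
        intro t ht; exact hcount t (List.mem_cons_of_mem _ ht)
      have hsum_nonneg : 0 ≤ ((rest.filter (fun s => PySem.Str.lower s == s)).map
          (fun s => (List.count s b : Int) - 1)).sum := by
        apply List.sum_nonneg
        intro x hx
        obtain ⟨t, ht, rfl⟩ := List.mem_map.mp hx
        have htf := List.mem_filter.mp ht
        have := hrest t htf.1 htf.2
        omega
      by_cases hp : (PySem.Str.lower s == s) = true
      · have hc1 : 1 ≤ List.count s b := hcount s (List.mem_cons_self) hp
        simp only [branchvalidLoop, hp, if_pos, List.filter_cons, List.map_cons, List.sum_cons]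
        have hcnt : PySem.List.count b s = List.count s b := rfl
        by_cases h2 : PySem.List.count b s > 2
        · rw [if_pos h2]
          rw [hcnt] at h2
          have : ¬ (m + (((List.count s b : Int) - 1) +
              ((rest.filter (fun s => PySem.Str.lower s == s)).map
                (fun s => (List.count s b : Int) - 1)).sum) ≤ 1) := by omega
          simp [this]
        · rw [if_neg h2]
          rw [hcnt] at h2
          by_cases he : PySem.List.count b s == 2
          · rw [if_pos he]
            have he' : List.count s b = 2 := by
              have := of_decide_eq_true he; exact this
            rw [ih (m + 1) (by omega) hrest]
            rw [he']
            simp only [decide_eq_decide]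
            omega
          · rw [if_neg he]
            have he' : ¬ List.count s b = 2 := by
              intro h; exact he (by simp [PySem.List.count, h])
            have hc : List.count s b = 1 := by omega
            rw [ih m hm hrest]
            rw [hc]
            simp only [decide_eq_decide]
            omega
      · simp only [branchvalidLoop, hp, List.filter_cons, Bool.false_eq_true, if_false]
        exact ih m hm hrest

-- ===== VERDICT (by name: the statement is the Claim_ definition above) =====
theorem branchvalid_spec : Claim_equal_branchvalid := by
  intro b _
  unfold Spec_branchvalid branchvalid branchvalid_alt
  rw [pv_foldl_filter_if]
  rw [PySem.Dict.foldl_insert_getD_add_one_eq_counter]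
  rw [pv_loop_eq b (PySem.Set.ofList b) 0 (by omega)
    (fun s hs _ => List.count_pos_iff.mpr ((PySem.Set.mem_ofList b s).mp hs))]
  simp only [PySem.Dict.values, PySem.Dict.items_counter, List.map_map]
  rw [pv_ofList_filter]
  congr 1
  rw [zero_add]
  congr 1
  congr 1
  apply List.map_congr_left
  intro k hk
  have hpk := (List.mem_filter.mp hk).2
  simp only [Function.comp]
  rw [List.count_filter (p := fun s => PySem.Str.lower s == s) hpk]
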